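-- pv_equiv track=rewrite | github.com/facebook/buck2-prelude | prelude/haskell/tools/generate_target_metadata.py | calc_transitive_deps
-- ===== SOURCE A (Python) =====
-- import graphlib
--
-- def calc_transitive_deps(pkgname, module_graph, package_deps, deps_md):
--     result = { modname: {} for modname in module_graph.keys() }
--
--     for modname, dep_pkgs in package_deps.items():
--         for dep_pkg, dep_pkg_mods in dep_pkgs.items():
--             result[modname].setdefault(dep_pkg, set()).update(dep_pkg_mods)
--
--             for dep_pkg_mod in dep_pkg_mods:
--                 transitive_deps = deps_md[dep_pkg]["transitive_deps"][dep_pkg_mod]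
--                 for transitive_pkg, transitive_mods in transitive_deps.items():
--                     result[modname].setdefault(transitive_pkg, set()).update(set(transitive_mods))
--
--     for modname in graphlib.TopologicalSorter(module_graph).static_order():
--         dep_mods = module_graph[modname]
--         if dep_mods:
--             result[modname].setdefault(pkgname, set()).update(dep_mods)
--         for dep_mod in dep_mods:
--             for dep_pkg, dep_pkg_mods in result[dep_mod].items():
--                 result[modname].setdefault(dep_pkg, set()).update(dep_pkg_mods)
--
--     return result
-- ===== SOURCE B (Python) =====
-- def calc_transitive_deps(pkgname, module_graph, package_deps, deps_md):
--     result = {modname: {} for modname in module_graph.keys()}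
--
--     # seeding pass (same as the original): direct package deps plus their recorded
--     # transitive deps, straight out of deps_md
--     for modname, dep_pkgs in package_deps.items():
--         for dep_pkg, dep_pkg_mods in dep_pkgs.items():
--             result[modname].setdefault(dep_pkg, set()).update(dep_pkg_mods)
--             for dep_pkg_mod in dep_pkg_mods:
--                 for tpkg, tmods in deps_md[dep_pkg]["transitive_deps"][dep_pkg_mod].items():
--                     result[modname].setdefault(tpkg, set()).update(set(tmods))
--
--     # Instead of a global topological sort followed by a sweep (graphlib in the
--     # original), finalize each module on demand by memoized depth-first
--     # resolution; an explicit on-stack set detects dependency cycles (on which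
--     # the original raises graphlib.CycleError instead).
--     finalized = set()
--     on_stack = set()
--
--     def resolve(modname):
--         if modname in finalized:
--             return
--         if modname in on_stack:
--             raise ValueError("dependency cycle involving %r" % (modname,))
--         on_stack.add(modname)
--         dep_mods = module_graph[modname]
--         if dep_mods:
--             result[modname].setdefault(pkgname, set()).update(dep_mods)
--         for dep_mod in dep_mods:
--             resolve(dep_mod)
--             for pkg, mods in result[dep_mod].items():
--                 result[modname].setdefault(pkg, set()).update(mods)
--         on_stack.discard(modname)
--         finalized.add(modname)
--
--     for modname in module_graph:
--         resolve(modname)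
--
--     return result
-- ===== Notes on version B (the rewrite author's own statement) =====
-- stated objective: alternative
-- what changed: The graphlib.TopologicalSorter global sort followed by a linear merge sweep is replaced by a memoized depth-first resolve() that finalizes each module on demand, merging dependency rows during the recursion, with an on-stack set for cycle detection; the seeding pass over package_deps/deps_md is unchanged. Pre_ additionally excludes association lists with duplicate keys at any dict level, which do not represent Python dicts.
import Mathlib
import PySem

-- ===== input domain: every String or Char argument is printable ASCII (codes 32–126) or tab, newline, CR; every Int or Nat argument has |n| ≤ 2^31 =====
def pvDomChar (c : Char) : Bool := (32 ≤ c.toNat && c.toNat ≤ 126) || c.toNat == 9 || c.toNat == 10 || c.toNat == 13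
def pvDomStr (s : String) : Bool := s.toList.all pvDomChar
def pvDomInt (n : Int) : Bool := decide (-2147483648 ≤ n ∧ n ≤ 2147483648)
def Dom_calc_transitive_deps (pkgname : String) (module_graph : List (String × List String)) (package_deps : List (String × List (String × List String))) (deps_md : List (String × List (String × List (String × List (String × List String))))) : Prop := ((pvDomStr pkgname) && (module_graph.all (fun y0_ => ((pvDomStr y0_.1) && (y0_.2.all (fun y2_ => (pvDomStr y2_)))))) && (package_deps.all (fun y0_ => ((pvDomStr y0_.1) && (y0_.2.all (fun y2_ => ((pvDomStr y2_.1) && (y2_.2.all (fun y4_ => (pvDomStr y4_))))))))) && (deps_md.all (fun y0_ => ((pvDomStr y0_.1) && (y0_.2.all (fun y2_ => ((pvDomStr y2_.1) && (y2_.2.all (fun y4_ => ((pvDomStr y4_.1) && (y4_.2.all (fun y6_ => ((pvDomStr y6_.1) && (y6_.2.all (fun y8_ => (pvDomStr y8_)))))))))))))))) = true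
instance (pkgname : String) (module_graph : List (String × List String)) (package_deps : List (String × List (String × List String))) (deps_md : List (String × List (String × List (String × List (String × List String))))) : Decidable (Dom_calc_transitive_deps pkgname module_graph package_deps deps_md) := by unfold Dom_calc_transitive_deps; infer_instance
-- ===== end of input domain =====

-- ===== PORT A =====
-- B changes the pass that propagates dependencies along the module graph: A ports graphlib's
-- topological sort + linear sweep, B (below) finalizes modules by memoized depth-first resolution.
-- Equivalence is proved for the returned value; set/dict values are built with PySem.Set/PySem.Dict.

-- inner dicts: package name -> set of modules (a PySem.Set, built only with Set.add)
abbrev pvInner : Type := PySem.Dict String (List String)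

abbrev pvOuter : Type := PySem.Dict String pvInner

-- result[m].setdefault(k, set()).update(xs)  (update(set(xs)) inserts the same distinct elements)
def pvUpd (d : pvInner) (k : String) (xs : List String) : pvInner :=
  d.insert k (xs.foldl PySem.Set.add (d.getD k []))

-- module_graph[m]
def pvDeps (module_graph : List (String × List String)) (m : String) : List String :=
  (PySem.Dict.mk module_graph).getD m []

-- the first pass of BOTH Pythons (their seeding code is identical):
-- result = {m: {} for m in module_graph}, then the package_deps/deps_md loop
def pvSeed (module_graph : List (String × List String)) (package_deps : List (String × List (String × List String))) (deps_md : List (String × List (String × List (String × List (String × List String))))) : pvOuter :=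
  package_deps.foldl (fun st q =>
    q.2.foldl (fun st e =>
      let st := st.insert q.1 (pvUpd (st.getD q.1 PySem.Dict.empty) e.1 e.2)
      e.2.foldl (fun st dpm =>
        let td := (PySem.Dict.mk ((PySem.Dict.mk ((PySem.Dict.mk deps_md).getD e.1 [])).getD "transitive_deps" [])).getD dpm []
        td.foldl (fun st t => st.insert q.1 (pvUpd (st.getD q.1 PySem.Dict.empty) t.1 t.2)) st) st) st)
    (PySem.Dict.ofList (module_graph.map (fun p => (p.1, (PySem.Dict.empty : pvInner)))))

-- if dep_mods: result[m].setdefault(pkgname, set()).update(dep_mods)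
def pvApplySelf (pkgname : String) (module_graph : List (String × List String)) (m : String) (inner : pvInner) : pvInner :=
  if (pvDeps module_graph m).isEmpty then inner else pvUpd inner pkgname (pvDeps module_graph m)

-- for dep_pkg, mods in src.items(): dst.setdefault(dep_pkg, set()).update(mods)
def pvMergeRow (dst src : pvInner) : pvInner :=
  src.items.foldl (fun d t => pvUpd d t.1 t.2) dst

-- the body of A's second loop for one module m, reading dependency rows through `get`
def pvStep (pkgname : String) (module_graph : List (String × List String)) (get : String → pvInner) (m : String) (inner : pvInner) : pvInner :=
  (pvDeps module_graph m).foldl (fun acc d => pvMergeRow acc (get d)) (pvApplySelf pkgname module_graph m inner)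

-- graphlib.TopologicalSorter(module_graph).static_order(), ported as layered Kahn rounds:
-- each round emits every not-yet-emitted node all of whose predecessors are emitted.
-- (On a cycle Python raises CycleError; the port then simply stops emitting — outside Pre_.)
def pvKahnRound (module_graph : List (String × List String)) (e : List String) : List String :=
  e ++ (module_graph.filter (fun p => !(e.contains p.1) && p.2.all e.contains)).map Prod.fst

def pvKahnIter (module_graph : List (String × List String)) : Nat → List String
  | 0 => []
  | n+1 => pvKahnRound module_graph (pvKahnIter module_graph n)

def pvRun (pkgname : String) (module_graph : List (String × List String)) (order : List String) (st : pvOuter) : pvOuter :=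
  order.foldl (fun st m =>
    st.insert m (pvStep pkgname module_graph (fun d => st.getD d PySem.Dict.empty) m (st.getD m PySem.Dict.empty))) st

def calc_transitive_deps (pkgname : String) (module_graph : List (String × List String)) (package_deps : List (String × List (String × List String))) (deps_md : List (String × List (String × List (String × List (String × List String))))) : List (String × List (String × List String)) :=
  ((pvRun pkgname module_graph (pvKahnIter module_graph module_graph.length) (pvSeed module_graph package_deps deps_md)).items.map (fun p => (p.1, p.2.items)))

-- ===== PORT B =====
-- resolve(m): memoized DFS with an on-stack set; state = (result, finalized).
-- fuel is only a totality guard (module_graph.length + 1 levels suffice on any acyclic input);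
-- where Python B raises graphlib.CycleError (m on stack) the port returns the state unchanged — outside Pre_.
-- for dep_pkg, mods in result[d].items(): result[m].setdefault(dep_pkg, set()).update(mods)
def pvMergeInto (m d : String) (st : pvOuter × List String) : pvOuter × List String :=
  (st.1.insert m (pvMergeRow (st.1.getD m PySem.Dict.empty) (st.1.getD d PySem.Dict.empty)), st.2)

def pvResolve (pkgname : String) (module_graph : List (String × List String)) : Nat → List String → String → pvOuter × List String → pvOuter × List String
  | 0, _, _, st => st
  | (fuel+1), stack, m, st =>
    if PySem.Set.contains st.2 m then st
    else if PySem.Set.contains stack m then st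
    else
      let ds := pvDeps module_graph m
      let res0 := if ds.isEmpty then st.1 else st.1.insert m (pvUpd (st.1.getD m PySem.Dict.empty) pkgname ds)
      let st1 := ds.foldl (fun stx d => pvMergeInto m d (pvResolve pkgname module_graph fuel (PySem.Set.add stack m) d stx)) (res0, st.2)
      (st1.1, PySem.Set.add st1.2 m)

def calc_transitive_deps_alt (pkgname : String) (module_graph : List (String × List String)) (package_deps : List (String × List (String × List String))) (deps_md : List (String × List (String × List (String × List (String × List String))))) : List (String × List (String × List String)) :=
  let stF := module_graph.foldl (fun st p => pvResolve pkgname module_graph (module_graph.length + 1) [] p.1 st)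
    ((pvSeed module_graph package_deps deps_md), ([] : List String))
  stF.1.items.map (fun p => (p.1, p.2.items))

-- ===== PRECONDITION & SPEC =====
-- transitive closure of the dependency relation (for the acyclicity clause of Pre_)
def pvStepF (module_graph : List (String × List String)) (S : Finset String) : Finset String :=
  S ∪ S.biUnion (fun x => (pvDeps module_graph x).toFinset)

def pvDesc (module_graph : List (String × List String)) (m : String) : Finset String :=
  (pvStepF module_graph)^[module_graph.length + 1] (pvDeps module_graph m).toFinset

-- Pre_ holds exactly where A returns normally: the module graph is closed (every dependency is a
-- key — otherwise module_graph[mod] raises KeyError) and acyclic (otherwise graphlib raises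
-- CycleError), every module with package dependencies is a graph key (otherwise result[mod] raises
-- KeyError), and every deps_md lookup A performs succeeds (otherwise KeyError).  In addition Pre_
-- requires key lists at every dict level to be duplicate-free: an association list with duplicate
-- keys does not represent a Python dict (A's parameters are dicts), so nothing is claimed there.
def Pre_calc_transitive_deps (pkgname : String) (module_graph : List (String × List String)) (package_deps : List (String × List (String × List String))) (deps_md : List (String × List (String × List (String × List (String × List String))))) : Prop :=
  (module_graph.map Prod.fst).Nodup ∧
  (∀ p ∈ module_graph, ∀ d ∈ p.2, d ∈ module_graph.map Prod.fst) ∧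
  (∀ m ∈ module_graph.map Prod.fst, m ∉ pvDesc module_graph m) ∧
  (package_deps.map Prod.fst).Nodup ∧
  (∀ q ∈ package_deps, (q.2 ≠ [] → q.1 ∈ module_graph.map Prod.fst) ∧ (q.2.map Prod.fst).Nodup ∧
     (∀ e ∈ q.2, e.2 ≠ [] →
        e.1 ∈ deps_md.map Prod.fst ∧
        "transitive_deps" ∈ ((PySem.Dict.mk deps_md).getD e.1 []).map Prod.fst ∧
        (∀ mo ∈ e.2, mo ∈ ((PySem.Dict.mk ((PySem.Dict.mk deps_md).getD e.1 [])).getD "transitive_deps" []).map Prod.fst))) ∧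
  (deps_md.map Prod.fst).Nodup ∧
  (∀ r ∈ deps_md, (r.2.map Prod.fst).Nodup ∧
     ∀ t ∈ r.2, (t.2.map Prod.fst).Nodup ∧ ∀ u ∈ t.2, (u.2.map Prod.fst).Nodup)

instance (pkgname : String) (module_graph : List (String × List String)) (package_deps : List (String × List (String × List String))) (deps_md : List (String × List (String × List (String × List (String × List String))))) : Decidable (Pre_calc_transitive_deps pkgname module_graph package_deps deps_md) := by unfold Pre_calc_transitive_deps; infer_instance

def pvWitness_calc_transitive_deps : String × (List (String × List String)) × (List (String × List (String × List String))) × (List (String × List (String × List (String × List (String × List String))))) :=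
  ("pkg", [("a", ["b"]), ("b", [])], [("a", [("base", ["M1"])])],
   [("base", [("transitive_deps", [("M1", [("ghc", ["GHC.Base"])])])])])

def Spec_calc_transitive_deps (pkgname : String) (module_graph : List (String × List String)) (package_deps : List (String × List (String × List String))) (deps_md : List (String × List (String × List (String × List (String × List String))))) (out : List (String × List (String × List String))) : Prop := out = calc_transitive_deps_alt pkgname module_graph package_deps deps_md
instance (pkgname : String) (module_graph : List (String × List String)) (package_deps : List (String × List (String × List String))) (deps_md : List (String × List (String × List (String × List (String × List String))))) (out : List (String × List (String × List String))) : Decidable (Spec_calc_transitive_deps pkgname module_graph package_deps deps_md out) := by unfold Spec_calc_transitive_deps; infer_instance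

-- ===== CLAIM (what is proved, stated in full; the proofs are below) =====
def Claim_equal_calc_transitive_deps : Prop := ∀ (pkgname : String) (module_graph : List (String × List String)) (package_deps : List (String × List (String × List String))) (deps_md : List (String × List (String × List (String × List (String × List String))))), Dom_calc_transitive_deps pkgname module_graph package_deps deps_md → Pre_calc_transitive_deps pkgname module_graph package_deps deps_md → Spec_calc_transitive_deps pkgname module_graph package_deps deps_md (calc_transitive_deps pkgname module_graph package_deps deps_md)

-- ===== LEMMAS AND PROOFS =====

-- ---------- generic fold invariant ----------
lemma pvFoldInv {sigma alpha : Type} (P : sigma → Prop) (f : sigma → alpha → sigma) :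
    ∀ (l : List alpha) (s : sigma), P s → (∀ s x, x ∈ l → P s → P (f s x)) → P (l.foldl f s) := by
  intro l
  induction l with
  | nil => intro s h _; exact h
  | cons x t ih =>
    intro s h hstep
    exact ih _ (hstep s x (by simp) h) (fun s y hy => hstep s y (by simp [hy]))

-- ---------- transitive-closure (pvDesc) facts ----------
lemma pvStepF_subset (mg : List (String × List String)) (S : Finset String) : S ⊆ pvStepF mg S := by
  unfold pvStepF; exact Finset.subset_union_left

lemma pvIter_le (mg : List (String × List String)) (S : Finset String) {k l : Nat} (h : k ≤ l) :
    (pvStepF mg)^[k] S ⊆ (pvStepF mg)^[l] S := by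
  induction l with
  | zero => simp_all
  | succ n ih =>
    rcases Nat.lt_or_ge k (n+1) with hk | hk
    · have h1 : (pvStepF mg)^[k] S ⊆ (pvStepF mg)^[n] S := ih (by omega)
      rw [Function.iterate_succ_apply']
      exact h1.trans (pvStepF_subset mg _)
    · have : k = n + 1 := by omega
      subst this; exact subset_rfl

lemma pvDeps_mem_keys (mg : List (String × List String))
    (hcl : ∀ p ∈ mg, ∀ d ∈ p.2, d ∈ mg.map Prod.fst) :
    ∀ x y, y ∈ pvDeps mg x → y ∈ mg.map Prod.fst := by
  intro x y hy
  unfold pvDeps at hy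
  rw [PySem.Dict.getD_eq_get?_getD] at hy
  cases h : (PySem.Dict.mk mg).get? x with
  | none => rw [h] at hy; simp at hy
  | some r =>
    rw [h] at hy; simp at hy
    have := PySem.Dict.mem_items_of_get?_eq_some _ h
    exact hcl (x, r) this y hy

lemma pvIter_bounded (mg : List (String × List String))
    (hcl : ∀ p ∈ mg, ∀ d ∈ p.2, d ∈ mg.map Prod.fst)
    {S : Finset String} (hS : S ⊆ (mg.map Prod.fst).toFinset) (k : Nat) :
    (pvStepF mg)^[k] S ⊆ (mg.map Prod.fst).toFinset := by
  induction k with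
  | zero => simpa using hS
  | succ n ih =>
    rw [Function.iterate_succ_apply']
    unfold pvStepF
    apply Finset.union_subset ih
    intro y hy
    simp only [Finset.mem_biUnion] at hy
    obtain ⟨x, _, hyx⟩ := hy
    simp only [List.mem_toFinset] at hyx ⊢
    exact pvDeps_mem_keys mg hcl x y hyx

lemma pvStab (mg : List (String × List String)) {X : Finset String} (h : pvStepF mg X = X) :
    ∀ j, (pvStepF mg)^[j] X = X := by
  intro j
  induction j with
  | zero => rfl
  | succ n ih => rw [Function.iterate_succ_apply', ih, h]

lemma pvGrow (mg : List (String × List String)) (S : Finset String) :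
    ∀ n, (∀ k < n, (pvStepF mg)^[k] S ≠ (pvStepF mg)^[k+1] S) → n ≤ ((pvStepF mg)^[n] S).card := by
  intro n
  induction n with
  | zero => intro _; omega
  | succ m ih =>
    intro h
    have h1 : m ≤ ((pvStepF mg)^[m] S).card := ih (fun k hk => h k (by omega))
    have h2 : (pvStepF mg)^[m] S ⊂ (pvStepF mg)^[m+1] S :=
      HasSubset.Subset.ssubset_of_ne (pvIter_le mg S (by omega)) (h m (by omega))
    have := Finset.card_lt_card h2
    omega

lemma pvDesc_fix (mg : List (String × List String))
    (hcl : ∀ p ∈ mg, ∀ d ∈ p.2, d ∈ mg.map Prod.fst) (m : String) :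
    pvStepF mg (pvDesc mg m) = pvDesc mg m := by
  set S := (pvDeps mg m).toFinset with hSdef
  have hS : S ⊆ (mg.map Prod.fst).toFinset := by
    intro y hy
    simp only [hSdef, List.mem_toFinset] at hy ⊢
    exact pvDeps_mem_keys mg hcl m y hy
  by_cases hex : ∃ k ≤ mg.length + 1, (pvStepF mg)^[k] S = (pvStepF mg)^[k+1] S
  · obtain ⟨k, hk, hfix⟩ := hex
    have hfix' : pvStepF mg ((pvStepF mg)^[k] S) = (pvStepF mg)^[k] S := by
      rw [Function.iterate_succ_apply'] at hfix; exact hfix.symm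
    have h1 : (pvStepF mg)^[mg.length + 1] S = (pvStepF mg)^[k] S := by
      have : (pvStepF mg)^[mg.length + 1] S = (pvStepF mg)^[(mg.length + 1 - k) + k] S := by
        congr 1; omega
      rw [this, Function.iterate_add_apply]
      exact pvStab mg hfix' _
    unfold pvDesc
    rw [← hSdef, h1, hfix']
  · push_neg at hex
    have h1 : ∀ k < mg.length + 2, (pvStepF mg)^[k] S ≠ (pvStepF mg)^[k+1] S := by
      intro k hk; exact hex k (by omega)
    have h2 := pvGrow mg S (mg.length + 2) h1
    have h3 := Finset.card_le_card (pvIter_bounded mg hcl hS (mg.length + 2))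
    have h4 : ((mg.map Prod.fst).toFinset).card ≤ mg.length := by
      calc ((mg.map Prod.fst).toFinset).card ≤ (mg.map Prod.fst).length := (mg.map Prod.fst).toFinset_card_le
        _ = mg.length := by simp
    omega

lemma pvDesc_closed (mg : List (String × List String))
    (hcl : ∀ p ∈ mg, ∀ d ∈ p.2, d ∈ mg.map Prod.fst) {m x : String}
    (hx : x ∈ pvDesc mg m) : (pvDeps mg x).toFinset ⊆ pvDesc mg m := by
  intro y hy
  have : y ∈ pvStepF mg (pvDesc mg m) := by
    unfold pvStepF
    apply Finset.mem_union_right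
    exact Finset.mem_biUnion.mpr ⟨x, hx, hy⟩
  rwa [pvDesc_fix mg hcl m] at this

lemma pvDeps_subset_desc (mg : List (String × List String)) {m d : String}
    (hd : d ∈ pvDeps mg m) : d ∈ pvDesc mg m := by
  have h0 : d ∈ (pvDeps mg m).toFinset := List.mem_toFinset.mpr hd
  exact pvIter_le mg _ (Nat.zero_le _) h0

lemma pvDesc_trans (mg : List (String × List String))
    (hcl : ∀ p ∈ mg, ∀ d ∈ p.2, d ∈ mg.map Prod.fst) {m x : String}
    (hx : x ∈ pvDesc mg m) : pvDesc mg x ⊆ pvDesc mg m := by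
  unfold pvDesc
  have : ∀ k, (pvStepF mg)^[k] (pvDeps mg x).toFinset ⊆ pvDesc mg m := by
    intro k
    induction k with
    | zero => simpa using pvDesc_closed mg hcl hx
    | succ n ih =>
      rw [Function.iterate_succ_apply']
      unfold pvStepF
      apply Finset.union_subset ih
      intro y hy
      simp only [Finset.mem_biUnion] at hy
      obtain ⟨z, hz, hyz⟩ := hy
      exact pvDesc_closed mg hcl (ih hz) hyz
  exact this _

lemma pvDesc_card_lt (mg : List (String × List String))
    (hcl : ∀ p ∈ mg, ∀ d ∈ p.2, d ∈ mg.map Prod.fst)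
    (hac : ∀ m ∈ mg.map Prod.fst, m ∉ pvDesc mg m)
    {m d : String} (hd : d ∈ pvDeps mg m) :
    (pvDesc mg d).card < (pvDesc mg m).card := by
  have hdm : d ∈ pvDesc mg m := pvDeps_subset_desc mg hd
  have hsub : pvDesc mg d ⊆ pvDesc mg m := pvDesc_trans mg hcl hdm
  have hdk : d ∈ mg.map Prod.fst := pvDeps_mem_keys mg hcl m d hd
  have hdd : d ∉ pvDesc mg d := hac d hdk
  exact Finset.card_lt_card (Finset.ssubset_iff_of_subset hsub |>.mpr ⟨d, hdm, hdd⟩)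

lemma pvDesc_card_bound (mg : List (String × List String))
    (hcl : ∀ p ∈ mg, ∀ d ∈ p.2, d ∈ mg.map Prod.fst)
    (hac : ∀ m ∈ mg.map Prod.fst, m ∉ pvDesc mg m)
    {m : String} (hm : m ∈ mg.map Prod.fst) :
    (pvDesc mg m).card < mg.length := by
  have hsub : pvDesc mg m ⊆ (mg.map Prod.fst).toFinset.erase m := by
    intro y hy
    apply Finset.mem_erase.mpr
    constructor
    · intro h; exact hac m hm (h ▸ hy)
    · have : (pvDeps mg m).toFinset ⊆ (mg.map Prod.fst).toFinset := by
        intro z hz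
        simp only [List.mem_toFinset] at hz ⊢
        exact pvDeps_mem_keys mg hcl m z hz
      exact pvIter_bounded mg hcl this _ hy
  have h1 := Finset.card_le_card hsub
  have h2 : ((mg.map Prod.fst).toFinset.erase m).card < (mg.map Prod.fst).toFinset.card :=
    Finset.card_erase_lt_of_mem (List.mem_toFinset.mpr hm)
  have h3 : ((mg.map Prod.fst).toFinset).card ≤ mg.length := by
    calc ((mg.map Prod.fst).toFinset).card ≤ (mg.map Prod.fst).length := (mg.map Prod.fst).toFinset_card_le
      _ = mg.length := by simp
  omega



-- ---------- dictionary-state facts ----------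
lemma pvItemsRaw (l : List (String × pvInner)) (h : (l.map Prod.fst).Nodup) :
    l.map (fun p => (p.1, (PySem.Dict.mk l).getD p.1 PySem.Dict.empty)) = l := by
  induction l with
  | nil => rfl
  | cons x t ih =>
    simp only [List.map_cons, List.nodup_cons] at h
    obtain ⟨hx, ht⟩ := h
    simp only [List.map_cons, List.cons.injEq]
    constructor
    · rw [PySem.Dict.getD_eq_get?_getD, PySem.Dict.get?_mk_cons]
      simp
    · have hcong : ∀ p ∈ t, (p.1, (PySem.Dict.mk (x :: t)).getD p.1 PySem.Dict.empty)
          = (p.1, (PySem.Dict.mk t).getD p.1 PySem.Dict.empty) := by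
        intro p hp
        have hne : x.1 ≠ p.1 := by
          intro hcontra
          exact hx (hcontra ▸ List.mem_map_of_mem hp)
        rw [PySem.Dict.getD_eq_get?_getD, PySem.Dict.getD_eq_get?_getD, PySem.Dict.get?_mk_cons]
        simp [hne]
      rw [List.map_congr_left hcong, ih ht]

lemma pvItems_eq (d : pvOuter) (h : d.keys.Nodup) :
    d.items = d.keys.map (fun k => (k, d.getD k PySem.Dict.empty)) := by
  obtain ⟨l⟩ := d
  have hkeys : (PySem.Dict.mk l).keys = l.map Prod.fst := by
    simp [PySem.Dict.keys]
  rw [hkeys] at h ⊢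
  have := pvItemsRaw l h
  calc (PySem.Dict.mk l).items = l := rfl
    _ = (l.map Prod.fst).map (fun k => (k, (PySem.Dict.mk l).getD k PySem.Dict.empty)) := by
        conv_lhs => rw [← this]
        rw [List.map_map]
        rfl

lemma pvInsert_keys (st : pvOuter) (k : String) (v : pvInner) (h : k ∈ st.keys) :
    (st.insert k v).keys = st.keys :=
  PySem.Dict.keys_insert_of_contains st v ((PySem.Dict.contains_iff_mem_keys st k).mpr h)

lemma pvInsert_getD (st : pvOuter) (k k' : String) (v : pvInner) :
    (st.insert k v).getD k' PySem.Dict.empty = if k' = k then v else st.getD k' PySem.Dict.empty :=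
  PySem.Dict.getD_insert st k k' v PySem.Dict.empty

lemma pvDeps_eq_of_mem (mg : List (String × List String)) (hnd : (mg.map Prod.fst).Nodup)
    {p : String × List String} (h : p ∈ mg) : pvDeps mg p.1 = p.2 := by
  unfold pvDeps
  rw [PySem.Dict.getD_eq_get?_getD, PySem.Dict.get?_of_mem_items (PySem.Dict.mk mg) (k := p.1) (v := p.2)]
  · rfl
  · exact h
  · simpa [PySem.Dict.keys] using hnd

lemma pvSeed_keys (mg : List (String × List String)) (pd : List (String × List (String × List String))) (md : List (String × List (String × List (String × List (String × List String)))))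
    (hnd : (mg.map Prod.fst).Nodup)
    (hpd : ∀ q ∈ pd, q.2 ≠ [] → q.1 ∈ mg.map Prod.fst) :
    (pvSeed mg pd md).keys = mg.map Prod.fst := by
  have hins : ∀ (k : String), k ∈ mg.map Prod.fst → ∀ (st : pvOuter) (v : pvInner),
      st.keys = mg.map Prod.fst → (st.insert k v).keys = mg.map Prod.fst := by
    intro k hk st v h
    rw [pvInsert_keys st k v (h ▸ hk)]
    exact h
  have hinit : (PySem.Dict.ofList (mg.map (fun p => (p.1, (PySem.Dict.empty : pvInner))))).keys = mg.map Prod.fst := by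
    show (PySem.Dict.empty.update (mg.map (fun p => (p.1, (PySem.Dict.empty : pvInner))))).keys = _
    unfold PySem.Dict.update
    have := PySem.Dict.keys_foldl_insert_key (ν := pvInner)
      (mg.map (fun p => (p.1, (PySem.Dict.empty : pvInner)))) Prod.fst (fun _ x => x.2) PySem.Dict.empty
    calc (List.foldl (fun acc p => acc.insert p.1 p.2) PySem.Dict.empty
            (mg.map (fun p => (p.1, (PySem.Dict.empty : pvInner))))).keys
        = PySem.Set.update PySem.Dict.empty.keys ((mg.map (fun p => (p.1, (PySem.Dict.empty : pvInner)))).map Prod.fst) := by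
          exact this
      _ = mg.map Prod.fst := by
          have hmap : (mg.map (fun p => (p.1, (PySem.Dict.empty : pvInner)))).map Prod.fst = mg.map Prod.fst := by
            rw [List.map_map]; rfl
          rw [hmap]
          show PySem.Set.update ([] : List String) (mg.map Prod.fst) = mg.map Prod.fst
          calc PySem.Set.update ([] : List String) (mg.map Prod.fst)
              = PySem.Set.ofList (mg.map Prod.fst) := rfl
            _ = mg.map Prod.fst := PySem.Set.ofList_eq_self_of_nodup _ hnd
  unfold pvSeed
  apply pvFoldInv (fun st : pvOuter => st.keys = mg.map Prod.fst) _ pd _ hinit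
  intro st q hq hkeys
  apply pvFoldInv (fun st : pvOuter => st.keys = mg.map Prod.fst) _ q.2 st hkeys
  intro st2 e he hkeys2
  have hq1 : q.1 ∈ mg.map Prod.fst := hpd q hq (by intro hcon; rw [hcon] at he; cases he)
  dsimp only
  apply pvFoldInv (fun st : pvOuter => st.keys = mg.map Prod.fst) _ e.2 _
    (hins q.1 hq1 st2 _ hkeys2)
  intro st3 dpm _ hkeys3
  dsimp only
  apply pvFoldInv (fun st : pvOuter => st.keys = mg.map Prod.fst) _ _ _ hkeys3
  intro st4 t _ hkeys4
  exact hins q.1 hq1 st4 _ hkeys4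

-- ---------- the common per-module value pvF / pvFF ----------
def pvF (pkgname : String) (mg : List (String × List String)) (pd : List (String × List (String × List String))) (md : List (String × List (String × List (String × List (String × List String))))) : Nat → String → pvInner
  | 0, m => pvApplySelf pkgname mg m ((pvSeed mg pd md).getD m PySem.Dict.empty)
  | (f+1), m => pvStep pkgname mg (pvF pkgname mg pd md f) m ((pvSeed mg pd md).getD m PySem.Dict.empty)

def pvFF (pkgname : String) (mg : List (String × List String)) (pd : List (String × List (String × List String))) (md : List (String × List (String × List (String × List (String × List String))))) (m : String) : pvInner :=
  pvF pkgname mg pd md (mg.length + 1) m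

lemma pvStep_congr (pkgname : String) (mg : List (String × List String)) (get1 get2 : String → pvInner) (m : String) (v : pvInner)
    (h : ∀ d ∈ pvDeps mg m, get1 d = get2 d) :
    pvStep pkgname mg get1 m v = pvStep pkgname mg get2 m v := by
  unfold pvStep
  have haux : ∀ (l : List String) (acc : pvInner), (∀ d ∈ l, get1 d = get2 d) →
      l.foldl (fun acc d => pvMergeRow acc (get1 d)) acc = l.foldl (fun acc d => pvMergeRow acc (get2 d)) acc := by
    intro l
    induction l with
    | nil => intro acc _; rfl
    | cons x t ih =>
      intro acc hl
      simp only [List.foldl_cons]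
      rw [hl x (by simp), ih _ (fun d hd => hl d (by simp [hd]))]
  exact haux _ _ h

lemma pvF_stab (pkgname : String) (mg : List (String × List String)) (pd : List (String × List (String × List String))) (md : List (String × List (String × List (String × List (String × List String)))))
    (hcl : ∀ p ∈ mg, ∀ d ∈ p.2, d ∈ mg.map Prod.fst)
    (hac : ∀ m ∈ mg.map Prod.fst, m ∉ pvDesc mg m) :
    ∀ (n : Nat) (m : String), (pvDesc mg m).card ≤ n → ∀ f1 f2, (pvDesc mg m).card < f1 → (pvDesc mg m).card < f2 →
      pvF pkgname mg pd md f1 m = pvF pkgname mg pd md f2 m := by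
  intro n
  induction n with
  | zero =>
    intro m hm f1 f2 h1 h2
    obtain ⟨a, rfl⟩ : ∃ a, f1 = a + 1 := ⟨f1 - 1, by omega⟩
    obtain ⟨b, rfl⟩ : ∃ b, f2 = b + 1 := ⟨f2 - 1, by omega⟩
    simp only [pvF]
    apply pvStep_congr
    intro d hd
    exact absurd (pvDesc_card_lt mg hcl hac hd) (by omega)
  | succ n ih =>
    intro m hm f1 f2 h1 h2
    obtain ⟨a, rfl⟩ : ∃ a, f1 = a + 1 := ⟨f1 - 1, by omega⟩
    obtain ⟨b, rfl⟩ : ∃ b, f2 = b + 1 := ⟨f2 - 1, by omega⟩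
    simp only [pvF]
    apply pvStep_congr
    intro d hd
    have hlt := pvDesc_card_lt mg hcl hac hd
    exact ih d (by omega) a b (by omega) (by omega)

lemma pvF_unfold (pkgname : String) (mg : List (String × List String)) (pd : List (String × List (String × List String))) (md : List (String × List (String × List (String × List (String × List String)))))
    (hcl : ∀ p ∈ mg, ∀ d ∈ p.2, d ∈ mg.map Prod.fst)
    (hac : ∀ m ∈ mg.map Prod.fst, m ∉ pvDesc mg m)
    {m : String} (hm : m ∈ mg.map Prod.fst) :
    pvFF pkgname mg pd md m = pvStep pkgname mg (pvFF pkgname mg pd md) m ((pvSeed mg pd md).getD m PySem.Dict.empty) := by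
  unfold pvFF
  have hrw : pvF pkgname mg pd md (mg.length + 1) m
      = pvStep pkgname mg (pvF pkgname mg pd md mg.length) m ((pvSeed mg pd md).getD m PySem.Dict.empty) := rfl
  rw [hrw]
  apply pvStep_congr
  intro d hd
  have h1 := pvDesc_card_lt mg hcl hac hd
  have h2 := pvDesc_card_bound mg hcl hac hm
  show pvF pkgname mg pd md mg.length d = pvF pkgname mg pd md (mg.length + 1) d
  exact pvF_stab pkgname mg pd md hcl hac (pvDesc mg d).card d le_rfl _ _ (by omega) (by omega)


-- ---------- A-side: processing any deps-first order computes pvFF ----------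
lemma pvRun_round (pkgname : String) (mg : List (String × List String)) (pd : List (String × List (String × List String))) (md : List (String × List (String × List (String × List (String × List String)))))
    (hcl : ∀ p ∈ mg, ∀ d ∈ p.2, d ∈ mg.map Prod.fst)
    (hac : ∀ m ∈ mg.map Prod.fst, m ∉ pvDesc mg m) :
    ∀ (new : List String) (P : List String) (st : pvOuter),
      st.keys = mg.map Prod.fst →
      (∀ k, st.getD k PySem.Dict.empty = if k ∈ P then pvFF pkgname mg pd md k else (pvSeed mg pd md).getD k PySem.Dict.empty) →
      new.Nodup →
      (∀ m ∈ new, m ∈ mg.map Prod.fst ∧ m ∉ P ∧ ∀ d ∈ pvDeps mg m, d ∈ P) →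
      ((pvRun pkgname mg new st).keys = mg.map Prod.fst ∧
       ∀ k, (pvRun pkgname mg new st).getD k PySem.Dict.empty = if k ∈ P ++ new then pvFF pkgname mg pd md k else (pvSeed mg pd md).getD k PySem.Dict.empty) := by
  intro new
  induction new with
  | nil =>
    intro P st hkeys hget _ _
    refine ⟨hkeys, ?_⟩
    simpa using hget
  | cons m t ih =>
    intro P st hkeys hget hnodup hmem
    obtain ⟨hmk, hmP, hmdeps⟩ := hmem m (by simp)
    simp only [List.nodup_cons] at hnodup
    have hstep : pvStep pkgname mg (fun d => st.getD d PySem.Dict.empty) m (st.getD m PySem.Dict.empty)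
        = pvFF pkgname mg pd md m := by
      have h1 : st.getD m PySem.Dict.empty = (pvSeed mg pd md).getD m PySem.Dict.empty := by
        rw [hget m, if_neg hmP]
      rw [h1]
      rw [pvStep_congr pkgname mg _ (pvFF pkgname mg pd md) m _ ?_]
      · exact (pvF_unfold pkgname mg pd md hcl hac hmk).symm
      · intro d hd
        rw [hget d, if_pos (hmdeps d hd)]
    have hrun : pvRun pkgname mg (m :: t) st
        = pvRun pkgname mg t (st.insert m (pvFF pkgname mg pd md m)) := by
      unfold pvRun
      simp only [List.foldl_cons]
      rw [hstep]
    rw [hrun]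
    have hkeys' : (st.insert m (pvFF pkgname mg pd md m)).keys = mg.map Prod.fst := by
      rw [pvInsert_keys st m _ (hkeys ▸ hmk)]; exact hkeys
    have hget' : ∀ k, (st.insert m (pvFF pkgname mg pd md m)).getD k PySem.Dict.empty
        = if k ∈ P ++ [m] then pvFF pkgname mg pd md k else (pvSeed mg pd md).getD k PySem.Dict.empty := by
      intro k
      rw [pvInsert_getD]
      by_cases hk : k = m
      · subst hk; simp
      · rw [if_neg hk, hget k]
        by_cases hkP : k ∈ P
        · rw [if_pos hkP, if_pos (by simp [hkP])]
        · rw [if_neg hkP, if_neg (by simp [hkP, hk])]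
    have := ih (P ++ [m]) (st.insert m (pvFF pkgname mg pd md m)) hkeys' hget' hnodup.2
      (by
        intro m' hm'
        obtain ⟨h1, h2, h3⟩ := hmem m' (by simp [hm'])
        refine ⟨h1, ?_, ?_⟩
        · simp only [List.mem_append, List.mem_singleton]
          rintro (h | h)
          · exact h2 h
          · exact hnodup.1 (h ▸ hm')
        · intro d hd
          simp [h3 d hd])
    refine ⟨this.1, ?_⟩
    intro k
    rw [this.2 k]
    by_cases hk : k ∈ P ++ m :: t
    · rw [if_pos (by simpa [List.append_assoc] using hk), if_pos hk]
    · rw [if_neg (by simpa [List.append_assoc] using hk), if_neg hk]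

lemma pvKahn_main (pkgname : String) (mg : List (String × List String)) (pd : List (String × List (String × List String))) (md : List (String × List (String × List (String × List (String × List String)))))
    (hnd : (mg.map Prod.fst).Nodup)
    (hcl : ∀ p ∈ mg, ∀ d ∈ p.2, d ∈ mg.map Prod.fst)
    (hac : ∀ m ∈ mg.map Prod.fst, m ∉ pvDesc mg m)
    (hpd : ∀ q ∈ pd, q.2 ≠ [] → q.1 ∈ mg.map Prod.fst) :
    ∀ r : Nat,
      (pvKahnIter mg r).Nodup ∧
      ((pvRun pkgname mg (pvKahnIter mg r) (pvSeed mg pd md)).keys = mg.map Prod.fst ∧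
       ∀ k, (pvRun pkgname mg (pvKahnIter mg r) (pvSeed mg pd md)).getD k PySem.Dict.empty
          = if k ∈ pvKahnIter mg r then pvFF pkgname mg pd md k else (pvSeed mg pd md).getD k PySem.Dict.empty) := by
  intro r
  induction r with
  | zero =>
    refine ⟨List.nodup_nil, ⟨pvSeed_keys mg pd md hnd hpd, ?_⟩⟩
    intro k
    simp [pvRun, pvKahnIter]
  | succ r ih =>
    obtain ⟨hnodup, hkeys, hget⟩ := ih
    have hnew : ∀ m' ∈ (mg.filter (fun p => !((pvKahnIter mg r).contains p.1) && p.2.all (pvKahnIter mg r).contains)).map Prod.fst,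
        m' ∈ mg.map Prod.fst ∧ m' ∉ pvKahnIter mg r ∧ ∀ d ∈ pvDeps mg m', d ∈ pvKahnIter mg r := by
      intro m' hm'
      obtain ⟨p, hp, rfl⟩ := List.mem_map.mp hm'
      have hpmem := List.mem_filter.mp hp
      have hcond := hpmem.2
      simp at hcond
      refine ⟨List.mem_map_of_mem hpmem.1, hcond.1, ?_⟩
      intro d hd
      rw [pvDeps_eq_of_mem mg hnd hpmem.1] at hd
      exact hcond.2 d hd
    have hnewnodup : ((mg.filter (fun p => !((pvKahnIter mg r).contains p.1) && p.2.all (pvKahnIter mg r).contains)).map Prod.fst).Nodup := by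
      exact hnd.sublist (List.Sublist.map Prod.fst List.filter_sublist)
    have hrw : pvKahnIter mg (r+1) = pvKahnIter mg r ++ (mg.filter (fun p => !((pvKahnIter mg r).contains p.1) && p.2.all (pvKahnIter mg r).contains)).map Prod.fst := rfl
    have happ : pvRun pkgname mg (pvKahnIter mg (r+1)) (pvSeed mg pd md)
        = pvRun pkgname mg ((mg.filter (fun p => !((pvKahnIter mg r).contains p.1) && p.2.all (pvKahnIter mg r).contains)).map Prod.fst)
            (pvRun pkgname mg (pvKahnIter mg r) (pvSeed mg pd md)) := by
      rw [hrw]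
      unfold pvRun
      rw [List.foldl_append]
    have hround := pvRun_round pkgname mg pd md hcl hac _ (pvKahnIter mg r) _ hkeys hget hnewnodup hnew
    constructor
    · rw [hrw]
      rw [List.nodup_append]
      refine ⟨hnodup, hnewnodup, ?_⟩
      intro x hx y hy
      obtain ⟨_, hnotin, _⟩ := hnew y hy
      intro heq
      exact hnotin (heq ▸ hx)
    · rw [happ, hrw]
      exact hround

lemma pvKahn_complete (mg : List (String × List String))
    (hnd : (mg.map Prod.fst).Nodup)
    (hcl : ∀ p ∈ mg, ∀ d ∈ p.2, d ∈ mg.map Prod.fst)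
    (hac : ∀ m ∈ mg.map Prod.fst, m ∉ pvDesc mg m) :
    ∀ r : Nat, ∀ m ∈ mg.map Prod.fst, (pvDesc mg m).card < r → m ∈ pvKahnIter mg r := by
  intro r
  induction r with
  | zero => intro m _ h; omega
  | succ r ih =>
    intro m hm hcard
    have hrw : pvKahnIter mg (r+1) = pvKahnIter mg r ++ (mg.filter (fun p => !((pvKahnIter mg r).contains p.1) && p.2.all (pvKahnIter mg r).contains)).map Prod.fst := rfl
    rw [hrw]
    by_cases hin : m ∈ pvKahnIter mg r
    · exact List.mem_append_left _ hin
    · apply List.mem_append_right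
      obtain ⟨p, hp, hp1⟩ := List.mem_map.mp hm
      apply List.mem_map.mpr
      refine ⟨p, List.mem_filter.mpr ⟨hp, ?_⟩, hp1⟩
      simp only [Bool.and_eq_true, Bool.not_eq_true', List.all_eq_true]
      constructor
      · rw [← Bool.not_eq_true]
        intro hcontra
        exact hin (hp1 ▸ List.contains_iff_mem.mp (by simpa using hcontra))
      · intro d hd
        apply List.contains_iff_mem.mpr
        have hd' : d ∈ pvDeps mg m := by
          rw [← hp1, pvDeps_eq_of_mem mg hnd hp]
          exact hd
        have := pvDesc_card_lt mg hcl hac hd'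
        exact ih d (pvDeps_mem_keys mg hcl m d hd') (by omega)

lemma pvA_eq (pkgname : String) (mg : List (String × List String)) (pd : List (String × List (String × List String))) (md : List (String × List (String × List (String × List (String × List String)))))
    (hnd : (mg.map Prod.fst).Nodup)
    (hcl : ∀ p ∈ mg, ∀ d ∈ p.2, d ∈ mg.map Prod.fst)
    (hac : ∀ m ∈ mg.map Prod.fst, m ∉ pvDesc mg m)
    (hpd : ∀ q ∈ pd, q.2 ≠ [] → q.1 ∈ mg.map Prod.fst) :
    calc_transitive_deps pkgname mg pd md
      = (mg.map Prod.fst).map (fun k => (k, (pvFF pkgname mg pd md k).items)) := by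
  obtain ⟨_, hkeys, hget⟩ := pvKahn_main pkgname mg pd md hnd hcl hac hpd mg.length
  unfold calc_transitive_deps
  rw [pvItems_eq _ (hkeys ▸ hnd), hkeys, List.map_map]
  apply List.map_congr_left
  intro k hk
  have hcomplete := pvKahn_complete mg hnd hcl hac mg.length k hk (pvDesc_card_bound mg hcl hac hk)
  simp only [Function.comp]
  rw [hget k, if_pos hcomplete]


-- ---------- B-side: the memoized DFS also computes pvFF ----------
lemma pvResolve_fin_mono (pkgname : String) (mg : List (String × List String)) :
    ∀ (fuel : Nat) (stack : List String) (m : String) (st : pvOuter × List String) (k : String),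
      k ∈ st.2 → k ∈ (pvResolve pkgname mg fuel stack m st).2 := by
  intro fuel
  induction fuel with
  | zero => intro stack m st k hk; exact hk
  | succ fuel ih =>
    intro stack m st k hk
    by_cases hb1 : PySem.Set.contains st.2 m = true
    · simp only [pvResolve, hb1, if_true]; exact hk
    · by_cases hb2 : PySem.Set.contains stack m = true
      · simp only [pvResolve, hb1, hb2, Bool.false_eq_true, if_false, if_true]; exact hk
      · simp only [pvResolve, hb1, hb2, Bool.false_eq_true, if_false]
        apply (PySem.Set.mem_add _ _ _).mpr
        left
        have hmono : ∀ (l : List String) (st' : pvOuter × List String), k ∈ st'.2 →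
            k ∈ ((l.foldl (fun stx d => pvMergeInto m d (pvResolve pkgname mg fuel (PySem.Set.add stack m) d stx)) st').2) := by
          intro l
          induction l with
          | nil => intro st' h; exact h
          | cons d t ihl =>
            intro st' h
            rw [List.foldl_cons]
            apply ihl
            unfold pvMergeInto
            exact ih (PySem.Set.add stack m) d st' k h
        exact hmono _ _ hk

lemma pvResolve_main (pkgname : String) (mg : List (String × List String)) (pd : List (String × List (String × List String))) (md : List (String × List (String × List (String × List (String × List String)))))
    (hnd : (mg.map Prod.fst).Nodup)
    (hcl : ∀ p ∈ mg, ∀ d ∈ p.2, d ∈ mg.map Prod.fst)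
    (hac : ∀ m ∈ mg.map Prod.fst, m ∉ pvDesc mg m) :
    ∀ (fuel : Nat), ∀ (m : String) (stack : List String) (st : pvOuter × List String) (g : String → pvInner),
      m ∈ mg.map Prod.fst →
      (pvDesc mg m).card < fuel →
      (∀ s ∈ stack, m ∈ pvDesc mg s) →
      st.1.keys = mg.map Prod.fst →
      (∀ k, st.1.getD k PySem.Dict.empty = g k) →
      (∀ k ∈ st.2, k ∈ mg.map Prod.fst ∧ g k = pvFF pkgname mg pd md k) →
      (∀ k ∈ mg.map Prod.fst, k ∉ st.2 → k ∉ stack → g k = (pvSeed mg pd md).getD k PySem.Dict.empty) →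
      ∃ g' : String → pvInner,
        (pvResolve pkgname mg fuel stack m st).1.keys = mg.map Prod.fst ∧
        (∀ k, (pvResolve pkgname mg fuel stack m st).1.getD k PySem.Dict.empty = g' k) ∧
        (∀ k ∈ st.2, k ∈ (pvResolve pkgname mg fuel stack m st).2) ∧
        m ∈ (pvResolve pkgname mg fuel stack m st).2 ∧
        (∀ k ∈ (pvResolve pkgname mg fuel stack m st).2, k ∈ mg.map Prod.fst ∧ g' k = pvFF pkgname mg pd md k) ∧
        (∀ k, k ≠ m → k ∉ pvDesc mg m → g' k = g k) ∧
        (∀ k ∈ (pvResolve pkgname mg fuel stack m st).2, k ∈ st.2 ∨ k = m ∨ k ∈ pvDesc mg m) ∧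
        (∀ k, g' k ≠ g k → k ∈ (pvResolve pkgname mg fuel stack m st).2) := by
  intro fuel
  induction fuel with
  | zero => intro m stack st g _ hcard _ _ _ _ _; omega
  | succ fuel ih =>
    intro m stack st g hm hcard hstack hkeys hget hfin hfresh
    by_cases hb1 : PySem.Set.contains st.2 m = true
    · -- already finalized: the call returns the state unchanged
      have heq : pvResolve pkgname mg (fuel+1) stack m st = st := by
        simp only [pvResolve, hb1, if_true]
      rw [heq]
      refine ⟨g, hkeys, hget, fun k hk => hk, (PySem.Set.contains_iff _ _).mp hb1, hfin, fun _ _ _ => rfl,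
        fun k hk => Or.inl hk, fun k hk => absurd rfl hk⟩
    · by_cases hb2 : PySem.Set.contains stack m = true
      · -- m on the stack: impossible on an acyclic graph
        exact absurd (hstack m ((PySem.Set.contains_iff _ _).mp hb2)) (hac m hm)
      · have hmnotfin : m ∉ st.2 := fun hc => hb1 ((PySem.Set.contains_iff _ _).mpr hc)
        have hmnotstack : m ∉ stack := fun hc => hb2 ((PySem.Set.contains_iff _ _).mpr hc)
        have hmnotdesc : m ∉ pvDesc mg m := hac m hm
        have hgm : g m = (pvSeed mg pd md).getD m PySem.Dict.empty := hfresh m hm hmnotfin hmnotstack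
        have heq : pvResolve pkgname mg (fuel+1) stack m st
            = (((pvDeps mg m).foldl (fun stx d => pvMergeInto m d (pvResolve pkgname mg fuel (PySem.Set.add stack m) d stx))
                  ((if (pvDeps mg m).isEmpty then st.1 else st.1.insert m (pvUpd (st.1.getD m PySem.Dict.empty) pkgname (pvDeps mg m))), st.2)).1,
               PySem.Set.add
                 ((pvDeps mg m).foldl (fun stx d => pvMergeInto m d (pvResolve pkgname mg fuel (PySem.Set.add stack m) d stx))
                  ((if (pvDeps mg m).isEmpty then st.1 else st.1.insert m (pvUpd (st.1.getD m PySem.Dict.empty) pkgname (pvDeps mg m))), st.2)).2 m) := by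
          simp only [pvResolve, hb1, hb2, Bool.false_eq_true, if_false]
        -- the state after the initial (possibly skipped) self insert
        have hres0keys : ((if (pvDeps mg m).isEmpty then st.1 else st.1.insert m (pvUpd (st.1.getD m PySem.Dict.empty) pkgname (pvDeps mg m))) : pvOuter).keys = mg.map Prod.fst := by
          by_cases hds : (pvDeps mg m).isEmpty
          · rw [if_pos hds]; exact hkeys
          · rw [if_neg hds, pvInsert_keys _ _ _ (hkeys ▸ hm)]; exact hkeys
        have hres0get : ∀ k, ((if (pvDeps mg m).isEmpty then st.1 else st.1.insert m (pvUpd (st.1.getD m PySem.Dict.empty) pkgname (pvDeps mg m))) : pvOuter).getD k PySem.Dict.empty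
            = if k = m then pvApplySelf pkgname mg m (g m) else g k := by
          intro k
          by_cases hds : (pvDeps mg m).isEmpty
          · rw [if_pos hds]
            unfold pvApplySelf
            rw [if_pos hds, hget k]
            by_cases hk : k = m
            · subst hk; simp
            · rw [if_neg hk]
          · rw [if_neg hds, pvInsert_getD, hget m]
            unfold pvApplySelf
            rw [if_neg hds, hget k]
        -- main fold invariant over the dependency list
        have hfold : ∀ (l : List String), (∀ d ∈ l, d ∈ pvDeps mg m) →
            ∀ (st' : pvOuter × List String) (h : String → pvInner) (acc : pvInner),
            st'.1.keys = mg.map Prod.fst →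
            (∀ k, st'.1.getD k PySem.Dict.empty = if k = m then acc else h k) →
            (∀ k ∈ st'.2, k ∈ mg.map Prod.fst ∧ h k = pvFF pkgname mg pd md k) →
            (∀ k ∈ st'.2, k ∈ st.2 ∨ k ∈ pvDesc mg m) →
            (∀ k ∈ st.2, k ∈ st'.2) →
            (∀ k, k ≠ m → k ∉ pvDesc mg m → h k = g k) →
            (∀ k, k ≠ m → h k ≠ g k → k ∈ st'.2) →
            ∃ h' : String → pvInner,
              (l.foldl (fun stx d => pvMergeInto m d (pvResolve pkgname mg fuel (PySem.Set.add stack m) d stx)) st').1.keys = mg.map Prod.fst ∧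
              (∀ k, (l.foldl (fun stx d => pvMergeInto m d (pvResolve pkgname mg fuel (PySem.Set.add stack m) d stx)) st').1.getD k PySem.Dict.empty
                 = if k = m then l.foldl (fun a d => pvMergeRow a (pvFF pkgname mg pd md d)) acc else h' k) ∧
              (∀ k ∈ (l.foldl (fun stx d => pvMergeInto m d (pvResolve pkgname mg fuel (PySem.Set.add stack m) d stx)) st').2, k ∈ mg.map Prod.fst ∧ h' k = pvFF pkgname mg pd md k) ∧
              (∀ k ∈ (l.foldl (fun stx d => pvMergeInto m d (pvResolve pkgname mg fuel (PySem.Set.add stack m) d stx)) st').2, k ∈ st.2 ∨ k ∈ pvDesc mg m) ∧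
              (∀ k ∈ st'.2, k ∈ (l.foldl (fun stx d => pvMergeInto m d (pvResolve pkgname mg fuel (PySem.Set.add stack m) d stx)) st').2) ∧
              (∀ k, k ≠ m → k ∉ pvDesc mg m → h' k = g k) ∧
              (∀ k, k ≠ m → h' k ≠ g k → k ∈ (l.foldl (fun stx d => pvMergeInto m d (pvResolve pkgname mg fuel (PySem.Set.add stack m) d stx)) st').2) := by
          intro l
          induction l with
          | nil =>
            intro hmem st' h acc h1 h2 h3 h4 h5 h6 h7
            exact ⟨h, h1, h2, h3, h4, fun k hk => hk, h6, h7⟩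
          | cons d t iht =>
            intro hmem st' h acc h1 h2 h3 h4 h5 h6 h7
            have hd : d ∈ pvDeps mg m := hmem d (by simp)
            have hdk : d ∈ mg.map Prod.fst := pvDeps_mem_keys mg hcl m d hd
            have hddesc : d ∈ pvDesc mg m := pvDeps_subset_desc mg hd
            have hdnm : d ≠ m := by
              intro hcon; exact hmnotdesc (hcon ▸ hddesc)
            have hmnotdescd : m ∉ pvDesc mg d := by
              intro hcon; exact hmnotdesc (pvDesc_trans mg hcl hddesc hcon)
            -- the recursive call on d
            obtain ⟨g'', r1, r2, r3, r4, r5, r6, r7, r8⟩ :=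
              ih d (PySem.Set.add stack m) st' (fun k => if k = m then acc else h k) hdk
                (by
                  have := pvDesc_card_lt mg hcl hac hd
                  omega)
                (by
                  intro s hs
                  rcases (PySem.Set.mem_add _ _ _).mp hs with hs | hs
                  · exact pvDesc_trans mg hcl (hstack s hs) hddesc
                  · exact hs ▸ hddesc)
                h1 h2
                (by
                  intro k hk
                  have h3k := h3 k hk
                  have hknm : k ≠ m := by
                    intro hcon
                    rcases h4 k hk with hk2 | hk2
                    · exact hmnotfin (hcon ▸ hk2)
                    · exact hmnotdesc (hcon ▸ hk2)
                  have hval : (if k = m then acc else h k) = pvFF pkgname mg pd md k := by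
                    rw [if_neg hknm]; exact h3k.2
                  exact ⟨h3k.1, hval⟩)
                (by
                  intro k hkk hknfin hknstack
                  have hknm : k ≠ m := by
                    intro hcon
                    exact hknstack ((PySem.Set.mem_add _ _ _).mpr (Or.inr hcon))
                  have hknstack' : k ∉ stack := fun hc => hknstack ((PySem.Set.mem_add _ _ _).mpr (Or.inl hc))
                  have hval : (if k = m then acc else h k) = (pvSeed mg pd md).getD k PySem.Dict.empty := by
                    rw [if_neg hknm]
                    by_cases hhg : h k = g k
                    · rw [hhg]
                      exact hfresh k hkk (fun hc => hknfin (h5 k hc)) hknstack'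
                    · exact absurd (h7 k hknm hhg) hknfin
                  exact hval)
            -- facts about the state st2 after the call
            have hmnotfin2 : m ∉ (pvResolve pkgname mg fuel (PySem.Set.add stack m) d st').2 := by
              intro hc
              rcases r7 m hc with hc2 | hc2 | hc2
              · rcases h4 m hc2 with hc3 | hc3
                · exact hmnotfin hc3
                · exact hmnotdesc hc3
              · exact hdnm hc2.symm
              · exact hmnotdescd hc2
            have hg''m : g'' m = acc := by
              have := r6 m hdnm.symm hmnotdescd
              simpa using this
            have hg''d : g'' d = pvFF pkgname mg pd md d := (r5 d r4).2
            -- one merge step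
            have hstep : pvMergeInto m d (pvResolve pkgname mg fuel (PySem.Set.add stack m) d st')
                = ((pvResolve pkgname mg fuel (PySem.Set.add stack m) d st').1.insert m (pvMergeRow acc (pvFF pkgname mg pd md d)),
                   (pvResolve pkgname mg fuel (PySem.Set.add stack m) d st').2) := by
              unfold pvMergeInto
              rw [r2 m, r2 d, hg''m, hg''d]
            -- apply the list induction hypothesis to the tail
            obtain ⟨h', q1, q2, q3, q4, q5, q6, q7⟩ :=
              iht (fun d' hd' => hmem d' (by simp [hd']))
                ((pvResolve pkgname mg fuel (PySem.Set.add stack m) d st').1.insert m (pvMergeRow acc (pvFF pkgname mg pd md d)),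
                 (pvResolve pkgname mg fuel (PySem.Set.add stack m) d st').2)
                g'' (pvMergeRow acc (pvFF pkgname mg pd md d))
                (by rw [pvInsert_keys _ _ _ (r1 ▸ hm)]; exact r1)
                (by
                  intro k
                  show (PySem.Dict.insert _ m _).getD k PySem.Dict.empty = _
                  rw [pvInsert_getD]
                  by_cases hk : k = m
                  · rw [if_pos hk, if_pos hk]
                  · rw [if_neg hk, if_neg hk, r2 k])
                (by intro k hk; exact r5 k hk)
                (by
                  intro k hk
                  rcases r7 k hk with hc | hc | hc
                  · exact h4 k hc
                  · exact Or.inr (hc ▸ hddesc)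
                  · exact Or.inr (pvDesc_trans mg hcl hddesc hc))
                (by intro k hk; exact r3 k (h5 k hk))
                (by
                  intro k hknm hknd
                  have hknd' : k ∉ pvDesc mg d := fun hc => hknd (pvDesc_trans mg hcl hddesc hc)
                  have hkne : k ≠ d := fun hc => hknd (hc ▸ hddesc)
                  rw [r6 k hkne hknd', if_neg hknm]
                  exact h6 k hknm hknd)
                (by
                  intro k hknm hne
                  by_cases hgG : g'' k = (if k = m then acc else h k)
                  · rw [if_neg hknm] at hgG
                    have : h k ≠ g k := fun hc => hne (hgG ▸ hc)
                    exact r3 k (h7 k hknm this)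
                  · exact r8 k hgG)
            refine ⟨h', ?_, ?_, ?_, ?_, ?_, q6, ?_⟩
            · rw [List.foldl_cons, hstep]; exact q1
            · intro k
              rw [List.foldl_cons, hstep, q2 k, List.foldl_cons]
            · intro k hk
              rw [List.foldl_cons, hstep] at hk
              exact q3 k hk
            · intro k hk
              rw [List.foldl_cons, hstep] at hk
              exact q4 k hk
            · intro k hk
              rw [List.foldl_cons, hstep]
              exact q5 k (r3 k hk)
            · intro k hknm hne
              rw [List.foldl_cons, hstep]
              exact q7 k hknm hne
        -- apply the fold lemma to the full dependency list
        obtain ⟨h', q1, q2, q3, q4, q5, q6, q7⟩ :=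
          hfold (pvDeps mg m) (fun d hd => hd)
            ((if (pvDeps mg m).isEmpty then st.1 else st.1.insert m (pvUpd (st.1.getD m PySem.Dict.empty) pkgname (pvDeps mg m))), st.2)
            g (pvApplySelf pkgname mg m (g m))
            hres0keys hres0get
            (by intro k hk; exact hfin k hk)
            (by intro k hk; exact Or.inl hk)
            (by intro k hk; exact hk)
            (by intro k _ _; rfl)
            (by intro k _ hne; exact absurd rfl hne)
        have hvalm : (pvDeps mg m).foldl (fun a d => pvMergeRow a (pvFF pkgname mg pd md d)) (pvApplySelf pkgname mg m (g m))
            = pvFF pkgname mg pd md m := by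
          rw [hgm]
          exact (pvF_unfold pkgname mg pd md hcl hac hm).symm
        have c1 : (pvResolve pkgname mg (fuel+1) stack m st).1.keys = mg.map Prod.fst := by
          rw [heq]; exact q1
        have c2 : ∀ k, (pvResolve pkgname mg (fuel+1) stack m st).1.getD k PySem.Dict.empty
            = if k = m then pvFF pkgname mg pd md m else h' k := by
          intro k
          rw [heq]
          show (_ : pvOuter).getD k PySem.Dict.empty = _
          rw [q2 k]
          by_cases hk : k = m
          · rw [if_pos hk, if_pos hk]
            exact hvalm
          · rw [if_neg hk, if_neg hk]
        have c3 : ∀ k ∈ st.2, k ∈ (pvResolve pkgname mg (fuel+1) stack m st).2 := by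
          intro k hk
          rw [heq]
          exact (PySem.Set.mem_add _ _ _).mpr (Or.inl (q5 k hk))
        have c4 : m ∈ (pvResolve pkgname mg (fuel+1) stack m st).2 := by
          rw [heq]
          exact (PySem.Set.mem_add _ _ _).mpr (Or.inr rfl)
        have c5 : ∀ k ∈ (pvResolve pkgname mg (fuel+1) stack m st).2,
            k ∈ mg.map Prod.fst ∧ (if k = m then pvFF pkgname mg pd md m else h' k) = pvFF pkgname mg pd md k := by
          intro k hk
          rw [heq] at hk
          rcases (PySem.Set.mem_add _ _ _).mp hk with hk | hk
          · have hknm : k ≠ m := by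
              intro hcon
              rcases q4 k hk with hc | hc
              · exact hmnotfin (hcon ▸ hc)
              · exact hmnotdesc (hcon ▸ hc)
            rw [if_neg hknm]
            exact q3 k hk
          · subst hk
            exact ⟨hm, by rw [if_pos rfl]⟩
        have c6 : ∀ k, k ≠ m → k ∉ pvDesc mg m → (if k = m then pvFF pkgname mg pd md m else h' k) = g k := by
          intro k hknm hknd
          rw [if_neg hknm]
          exact q6 k hknm hknd
        have c7 : ∀ k ∈ (pvResolve pkgname mg (fuel+1) stack m st).2, k ∈ st.2 ∨ k = m ∨ k ∈ pvDesc mg m := by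
          intro k hk
          rw [heq] at hk
          rcases (PySem.Set.mem_add _ _ _).mp hk with hk | hk
          · rcases q4 k hk with hc | hc
            · exact Or.inl hc
            · exact Or.inr (Or.inr hc)
          · exact Or.inr (Or.inl hk)
        have c8 : ∀ k, (if k = m then pvFF pkgname mg pd md m else h' k) ≠ g k → k ∈ (pvResolve pkgname mg (fuel+1) stack m st).2 := by
          intro k hne
          rw [heq]
          by_cases hk : k = m
          · exact (PySem.Set.mem_add _ _ _).mpr (Or.inr hk)
          · rw [if_neg hk] at hne
            exact (PySem.Set.mem_add _ _ _).mpr (Or.inl (q7 k hk hne))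
        exact ⟨fun k => if k = m then pvFF pkgname mg pd md m else h' k, c1, c2, c3, c4, c5, c6, c7, c8⟩

lemma pvB_eq (pkgname : String) (mg : List (String × List String)) (pd : List (String × List (String × List String))) (md : List (String × List (String × List (String × List (String × List String)))))
    (hnd : (mg.map Prod.fst).Nodup)
    (hcl : ∀ p ∈ mg, ∀ d ∈ p.2, d ∈ mg.map Prod.fst)
    (hac : ∀ m ∈ mg.map Prod.fst, m ∉ pvDesc mg m)
    (hpd : ∀ q ∈ pd, q.2 ≠ [] → q.1 ∈ mg.map Prod.fst) :
    calc_transitive_deps_alt pkgname mg pd md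
      = (mg.map Prod.fst).map (fun k => (k, (pvFF pkgname mg pd md k).items)) := by
  have main : ∀ (l : List (String × List String)), (∀ x ∈ l, x.1 ∈ mg.map Prod.fst) →
      ∀ (st : pvOuter × List String) (g : String → pvInner),
      st.1.keys = mg.map Prod.fst →
      (∀ k, st.1.getD k PySem.Dict.empty = g k) →
      (∀ k ∈ st.2, k ∈ mg.map Prod.fst ∧ g k = pvFF pkgname mg pd md k) →
      (∀ k ∈ mg.map Prod.fst, k ∉ st.2 → g k = (pvSeed mg pd md).getD k PySem.Dict.empty) →
      ∃ g' : String → pvInner,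
        (l.foldl (fun st p => pvResolve pkgname mg (mg.length + 1) [] p.1 st) st).1.keys = mg.map Prod.fst ∧
        (∀ k, (l.foldl (fun st p => pvResolve pkgname mg (mg.length + 1) [] p.1 st) st).1.getD k PySem.Dict.empty = g' k) ∧
        (∀ k ∈ (l.foldl (fun st p => pvResolve pkgname mg (mg.length + 1) [] p.1 st) st).2, k ∈ mg.map Prod.fst ∧ g' k = pvFF pkgname mg pd md k) ∧
        (∀ x ∈ l, x.1 ∈ (l.foldl (fun st p => pvResolve pkgname mg (mg.length + 1) [] p.1 st) st).2) := by
    intro l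
    induction l with
    | nil =>
      intro _ st g h1 h2 h3 _
      exact ⟨g, h1, h2, h3, by simp⟩
    | cons x t iht =>
      intro hmem st g h1 h2 h3 h4
      have hx : x.1 ∈ mg.map Prod.fst := hmem x (by simp)
      obtain ⟨g'', r1, r2, r3, r4, r5, _, _, r8⟩ :=
        pvResolve_main pkgname mg pd md hnd hcl hac (mg.length + 1) x.1 [] st g hx
          (by have := pvDesc_card_bound mg hcl hac hx; omega)
          (by intro s hs; cases hs)
          h1 h2 h3
          (by intro k hk hknfin _; exact h4 k hk hknfin)
      obtain ⟨g', q1, q2, q3, q4⟩ :=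
        iht (fun y hy => hmem y (by simp [hy]))
          (pvResolve pkgname mg (mg.length + 1) [] x.1 st) g'' r1 r2 r5
          (by
            intro k hk hknfin
            have hgg : g'' k = g k := by
              by_contra hne
              exact hknfin (r8 k hne)
            rw [hgg]
            exact h4 k hk (fun hc => hknfin (r3 k hc)))
      refine ⟨g', q1, q2, q3, ?_⟩
      intro y hy
      have hfinmono : ∀ (l' : List (String × List String)) (st' : pvOuter × List String), ∀ k ∈ st'.2,
          k ∈ (l'.foldl (fun st p => pvResolve pkgname mg (mg.length + 1) [] p.1 st) st').2 := by
        intro l'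
        induction l' with
        | nil => intro st' k hk; exact hk
        | cons z t' ihz =>
          intro st' k hk
          rw [List.foldl_cons]
          exact ihz _ k (pvResolve_fin_mono pkgname mg (mg.length + 1) [] z.1 st' k hk)
      rcases List.mem_cons.mp hy with hyx | hy
      · rw [hyx, List.foldl_cons]
        exact hfinmono t _ x.1 r4
      · exact q4 y hy
  have hempty : ∀ k ∈ [], (k ∈ mg.map Prod.fst ∧ (fun k => (pvSeed mg pd md).getD k PySem.Dict.empty) k = pvFF pkgname mg pd md k) := by
    intro k hk; cases hk
  obtain ⟨g', q1, q2, q3, q4⟩ :=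
    main mg (fun x hx => List.mem_map_of_mem hx) ((pvSeed mg pd md), ([] : List String))
      (fun k => (pvSeed mg pd md).getD k PySem.Dict.empty)
      (pvSeed_keys mg pd md hnd hpd) (fun k => rfl) hempty (fun k _ _ => rfl)
  unfold calc_transitive_deps_alt
  show ((mg.foldl (fun st p => pvResolve pkgname mg (mg.length + 1) [] p.1 st) ((pvSeed mg pd md), ([] : List String))).1.items.map (fun p => (p.1, p.2.items))) = _
  rw [pvItems_eq _ (q1 ▸ hnd), q1, List.map_map]
  apply List.map_congr_left
  intro k hk
  simp only [Function.comp]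
  obtain ⟨p, hp, hp1⟩ := List.mem_map.mp hk
  have hkfin := hp1 ▸ q4 p hp
  rw [q2 k, (q3 k hkfin).2]


-- ===== VERDICT (by name: the statement is the Claim_ definition above) =====
theorem calc_transitive_deps_spec : Claim_equal_calc_transitive_deps := by
  unfold Claim_equal_calc_transitive_deps
  intro pkgname mg pd md _ hpre
  obtain ⟨hnd, hcl, hac, _, hpd5, _, _⟩ := hpre
  have hpd : ∀ q ∈ pd, q.2 ≠ [] → q.1 ∈ mg.map Prod.fst := fun q hq => (hpd5 q hq).1
  unfold Spec_calc_transitive_deps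
  rw [pvA_eq pkgname mg pd md hnd hcl hac hpd, pvB_eq pkgname mg pd md hnd hcl hac hpd]
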